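-- pv_equiv track=rewrite | github.com/Elyasirankhah/Patient_Voice_Agent_MVP | thread_analyzer.py | _parse_thread
-- ===== SOURCE A (Python) =====
-- from typing import Dict, List, Optional
--
-- def _parse_thread(thread_text: str) -> List[Dict]:
--     """Parse thread text into individual messages"""
--     messages = []
--     lines = thread_text.strip().split('\n')
--
--     current_role = None
--     current_content = []
--
--     for line in lines:
--         line = line.strip()
--         if not line:
--             continue
--
--         # Check for role indicators
--         if line.lower().startswith('patient:'):
--             # Save previous message if exists
--             if current_role and current_content:
--                 messages.append({
--                     'role': current_role,
--                     'content': ' '.join(current_content),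
--                     'timestamp': None
--                 })
--
--             current_role = 'patient'
--             current_content = [line.split(':', 1)[1].strip()] if ':' in line else []
--
--         elif line.lower().startswith('provider:') or line.lower().startswith('doctor:') or line.lower().startswith('clinician:'):
--             # Save previous message if exists
--             if current_role and current_content:
--                 messages.append({
--                     'role': current_role,
--                     'content': ' '.join(current_content),
--                     'timestamp': None
--                 })
--
--             current_role = 'provider'
--             current_content = [line.split(':', 1)[1].strip()] if ':' in line else []
--
--         else:
--             # Continuation of current message
--             if current_role:
--                 current_content.append(line)
--
--     # Save last message
--     if current_role and current_content:
--         messages.append({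
--             'role': current_role,
--             'content': ' '.join(current_content),
--             'timestamp': None
--         })
--
--     return messages
-- ===== SOURCE B (Python) =====
-- from typing import Dict, List, Optional
--
-- _ROLE_PREFIXES = ('patient:', 'provider:', 'doctor:', 'clinician:')
--
-- def _is_role(line: str) -> bool:
--     return line.lower().startswith(_ROLE_PREFIXES)
--
-- def _parse_lines(lines: List[str]) -> List[Dict]:
--     """Recursive segmentation: cut the line list at role-header lines."""
--     if not lines:
--         return []
--     head, rest = lines[0], lines[1:]
--     if not _is_role(head):
--         # a continuation line before any role header is dropped
--         return _parse_lines(rest)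
--     k = 0
--     while k < len(rest) and not _is_role(rest[k]):
--         k += 1
--     role = 'patient' if head.lower().startswith('patient:') else 'provider'
--     body = [head.split(':', 1)[1].strip()] + rest[:k]
--     return [{'role': role, 'content': ' '.join(body), 'timestamp': None}] + _parse_lines(rest[k:])
--
-- def _parse_thread(thread_text: str) -> List[Dict]:
--     lines = [s for s in (raw.strip() for raw in thread_text.strip().split('\n')) if s]
--     return _parse_lines(lines)
-- ===== Notes on version B (the rewrite author's own statement) =====
-- stated objective: alternative
-- what changed: Replaces A's single-pass mutable state machine (current_role/current_content with interleaved flushes) by a clean-then-segment decomposition: pre-filter the stripped nonempty lines, then recursively cut the list at role-header lines, emitting each segment as one message.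
import Mathlib
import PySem

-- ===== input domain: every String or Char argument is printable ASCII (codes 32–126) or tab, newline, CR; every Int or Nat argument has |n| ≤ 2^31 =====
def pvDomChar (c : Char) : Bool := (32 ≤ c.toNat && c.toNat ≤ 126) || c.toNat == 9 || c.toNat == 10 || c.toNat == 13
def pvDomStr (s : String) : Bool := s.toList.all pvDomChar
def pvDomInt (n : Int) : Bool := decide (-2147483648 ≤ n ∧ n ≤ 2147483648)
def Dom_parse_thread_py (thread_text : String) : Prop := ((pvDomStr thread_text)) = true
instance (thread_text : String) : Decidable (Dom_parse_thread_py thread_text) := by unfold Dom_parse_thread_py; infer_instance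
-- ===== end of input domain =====

-- B replaces A's mutable state machine by clean-then-segment recursion; objective: alternative decomposition, same cost.

-- ===== PORT A =====
-- the message dict {'role': r, 'content': ' '.join(c), 'timestamp': None}
def pvMsgA (r : String) (c : List String) : List (String × Option String) :=
  [("role", some r), ("content", some (PySem.Str.join " " c)), ("timestamp", (none : Option String))]

-- 'if current_role and current_content: messages.append(...)' (both flush sites of A)
def pvFlushA (msgs : List (List (String × Option String))) (role? : Option String)
    (content : List String) : List (List (String × Option String)) :=
  match role? with
  | some r => if content.isEmpty then msgs else msgs ++ [pvMsgA r content]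
  | none => msgs

-- one iteration of A's for-loop over the raw lines, state = (messages, current_role, current_content)
def pvStepA (st : List (List (String × Option String)) × Option String × List String)
    (raw : String) : List (List (String × Option String)) × Option String × List String :=
  let line := PySem.Str.strip raw
  if PySem.Str.len line = 0 then st
  else if PySem.Str.startswith (PySem.Str.lower line) "patient:" then
    (pvFlushA st.1 st.2.1 st.2.2, some "patient",
     if PySem.Str.isIn ":" line
       then [PySem.Str.strip (((PySem.Str.splitMax? line ":" 1).getD []).getD 1 "")]
       else [])
  else if PySem.Str.startswith (PySem.Str.lower line) "provider:"
       || PySem.Str.startswith (PySem.Str.lower line) "doctor:"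
       || PySem.Str.startswith (PySem.Str.lower line) "clinician:" then
    (pvFlushA st.1 st.2.1 st.2.2, some "provider",
     if PySem.Str.isIn ":" line
       then [PySem.Str.strip (((PySem.Str.splitMax? line ":" 1).getD []).getD 1 "")]
       else [])
  else
    match st.2.1 with
    | some _ => (st.1, st.2.1, st.2.2 ++ [line])
    | none => st

def parse_thread_py (thread_text : String) : List (List (String × Option String)) :=
  let lines := (PySem.Str.split? (PySem.Str.strip thread_text) "\n").getD []
  let st := lines.foldl pvStepA ([], none, [])
  pvFlushA st.1 st.2.1 st.2.2

-- ===== PORT B =====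
def pvIsRoleB (line : String) : Bool :=
  PySem.Str.startswith (PySem.Str.lower line) "patient:"
  || PySem.Str.startswith (PySem.Str.lower line) "provider:"
  || PySem.Str.startswith (PySem.Str.lower line) "doctor:"
  || PySem.Str.startswith (PySem.Str.lower line) "clinician:"

-- B's recursive segmentation: the while-loop computing k and the slices rest[:k]/rest[k:]
-- are ported as takeWhile/dropWhile of the non-role prefix (the same lists, step for step)
def pvParseLinesB : List String → List (List (String × Option String))
  | [] => []
  | head :: rest =>
    if pvIsRoleB head then
      let body := rest.takeWhile (fun l => !pvIsRoleB l)
      let rest' := rest.dropWhile (fun l => !pvIsRoleB l)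
      let role := if PySem.Str.startswith (PySem.Str.lower head) "patient:" then "patient" else "provider"
      [("role", some role),
       ("content", some (PySem.Str.join " "
         (PySem.Str.strip (((PySem.Str.splitMax? head ":" 1).getD []).getD 1 "") :: body))),
       ("timestamp", (none : Option String))] :: pvParseLinesB rest'
    else pvParseLinesB rest
termination_by ls => ls.length
decreasing_by
  · exact Nat.lt_succ_of_le (List.length_dropWhile_le _ _)
  · simp

def parse_thread_py_alt (thread_text : String) : List (List (String × Option String)) :=
  let cleaned := (((PySem.Str.split? (PySem.Str.strip thread_text) "\n").getD []).map
      PySem.Str.strip).filter (fun s => PySem.Str.len s != 0)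
  pvParseLinesB cleaned

-- ===== PRECONDITION & SPEC =====
def Spec_parse_thread_py (thread_text : String) (out : List (List (String × Option String))) : Prop := out = parse_thread_py_alt thread_text
instance (thread_text : String) (out : List (List (String × Option String))) : Decidable (Spec_parse_thread_py thread_text out) := by unfold Spec_parse_thread_py; infer_instance

-- ===== CLAIM (what is proved, stated in full; the proofs are below) =====
def Claim_equal_parse_thread_py : Prop := ∀ (thread_text : String), Dom_parse_thread_py thread_text → Spec_parse_thread_py thread_text (parse_thread_py thread_text)

-- ===== LEMMAS AND PROOFS =====

-- B's cleaning pass (strip every line, drop the empty ones)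
def pvClean (ls : List String) : List String :=
  (ls.map PySem.Str.strip).filter (fun s => PySem.Str.len s != 0)

theorem pvClean_nil : pvClean [] = [] := rfl

theorem pvClean_cons (raw : String) (ls : List String) :
    pvClean (raw :: ls) =
      if PySem.Str.len (PySem.Str.strip raw) = 0 then pvClean ls
      else PySem.Str.strip raw :: pvClean ls := by
  have hiff : (PySem.Str.strip raw = "") ↔ (PySem.Chars.strip raw.toList = []) := by
    rw [← PySem.Str.toList_strip]; exact String.toList_eq_nil_iff.symm
  by_cases h : PySem.Str.len (PySem.Str.strip raw) = 0
  · rw [if_pos h]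
    have h' : PySem.Chars.strip raw.toList = [] := by
      simp only [PySem.Str.len_eq] at h
      rw [← PySem.Str.toList_strip]
      simpa using h
    simp [pvClean, hiff, h']
  · rw [if_neg h]
    have h' : ¬ PySem.Chars.strip raw.toList = [] := by
      intro hh
      exact h (by rw [hiff.mpr hh]; rfl)
    simp [pvClean, hiff, h']

theorem pvLowerChar_eq_colon {c : Char} (h : PySem.Chars.lowerChar c = ':') : c = ':' := by
  unfold PySem.Chars.lowerChar PySem.Chars.isupper at h
  split_ifs at h with hu
  · exfalso
    simp only [Bool.and_eq_true, decide_eq_true_eq] at hu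
    have h2 : c.toNat ≤ 90 := by
      have := hu.2; simp only [Char.le_def, UInt32.le_iff_toNat_le] at this; exact this
    have hn := congrArg Char.toNat h
    have hv : (c.toNat + 32).isValidChar := Or.inl (by omega)
    rw [Char.toNat_ofNat, if_pos hv] at hn
    simp only [show (':' : Char).toNat = 58 from rfl] at hn
    have h1 : 65 ≤ c.toNat := by
      have := hu.1; simp only [Char.le_def, UInt32.le_iff_toNat_le] at this; exact this
    omega
  · exact h

-- a role header necessarily contains a colon, so A's "':' in line" guard is true there
theorem pvColon_of_prefix {s p : String} (hc : ':' ∈ p.toList)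
    (h : PySem.Str.startswith (PySem.Str.lower s) p = true) : PySem.Str.isIn ":" s = true := by
  simp only [PySem.Str.startswith_eq, PySem.Str.toList_lower, PySem.Chars.startswith_iff] at h
  have hmem : ':' ∈ PySem.Chars.lower s.toList := h.sublist.subset hc
  simp only [PySem.Chars.lower, List.mem_map] at hmem
  obtain ⟨c, hcs, hlc⟩ := hmem
  obtain rfl := pvLowerChar_eq_colon hlc
  rw [PySem.Str.isIn_iff_infix]
  obtain ⟨l1, l2, hsplit⟩ := List.append_of_mem hcs
  exact ⟨l1, l2, by rw [hsplit]; simp⟩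

theorem pvParseLinesB_nil : pvParseLinesB [] = [] := by rw [pvParseLinesB]

theorem pvParseLinesB_cons_role (head : String) (rest : List String) (h : pvIsRoleB head = true) :
    pvParseLinesB (head :: rest) =
      [("role", some (if PySem.Str.startswith (PySem.Str.lower head) "patient:" then "patient" else "provider")),
       ("content", some (PySem.Str.join " "
         (PySem.Str.strip (((PySem.Str.splitMax? head ":" 1).getD []).getD 1 "")
           :: rest.takeWhile (fun l => !pvIsRoleB l)))),
       ("timestamp", (none : Option String))]
      :: pvParseLinesB (rest.dropWhile (fun l => !pvIsRoleB l)) := by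
  rw [pvParseLinesB]
  simp [h]

theorem pvParseLinesB_cons_not (head : String) (rest : List String) (h : pvIsRoleB head = false) :
    pvParseLinesB (head :: rest) = pvParseLinesB rest := by
  rw [pvParseLinesB]
  simp [h]

theorem pvMain (ls : List String) :
    ∀ (msgs : List (List (String × Option String))) (r : String) (cs : List String), cs ≠ [] →
    (let st := ls.foldl pvStepA (msgs, some r, cs)
     pvFlushA st.1 st.2.1 st.2.2)
    = msgs ++ pvMsgA r (cs ++ (pvClean ls).takeWhile (fun l => !pvIsRoleB l))
        :: pvParseLinesB ((pvClean ls).dropWhile (fun l => !pvIsRoleB l)) := by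
  induction ls with
  | nil =>
    intro msgs r cs hcs
    simp only [List.foldl_nil, pvClean_nil, List.takeWhile_nil, List.dropWhile_nil,
      pvParseLinesB_nil, List.append_nil, pvFlushA]
    rw [if_neg (by simp [hcs])]
  | cons raw ls ih =>
    intro msgs r cs hcs
    simp only [List.foldl_cons]
    rw [pvClean_cons]
    by_cases h0 : PySem.Str.len (PySem.Str.strip raw) = 0
    · rw [if_pos h0]
      have hst : pvStepA (msgs, some r, cs) raw = (msgs, some r, cs) := by
        simp only [pvStepA]
        rw [if_pos h0]
      rw [hst]
      exact ih msgs r cs hcs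
    · rw [if_neg h0]
      by_cases hp : PySem.Str.startswith (PySem.Str.lower (PySem.Str.strip raw)) "patient:" = true
      · have hcolon := pvColon_of_prefix (by decide) hp
        have hrole : pvIsRoleB (PySem.Str.strip raw) = true := by
          simp only [pvIsRoleB]
          rw [hp]
          rfl
        have hst : pvStepA (msgs, some r, cs) raw =
            (msgs ++ [pvMsgA r cs], some "patient",
             [PySem.Str.strip (((PySem.Str.splitMax? (PySem.Str.strip raw) ":" 1).getD []).getD 1 "")]) := by
          simp only [pvStepA, pvFlushA]
          rw [if_neg h0, if_pos hp, if_pos hcolon, if_neg (by simp [hcs])]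
        rw [hst, ih _ _ _ (by simp)]
        rw [List.takeWhile_cons, List.dropWhile_cons]
        rw [if_neg (by simp [hrole]), if_neg (by simp [hrole])]
        rw [pvParseLinesB_cons_role _ _ hrole, if_pos hp]
        simp [pvMsgA]
      · by_cases hq : (PySem.Str.startswith (PySem.Str.lower (PySem.Str.strip raw)) "provider:"
            || PySem.Str.startswith (PySem.Str.lower (PySem.Str.strip raw)) "doctor:"
            || PySem.Str.startswith (PySem.Str.lower (PySem.Str.strip raw)) "clinician:") = true
        · have hcolon : PySem.Str.isIn ":" (PySem.Str.strip raw) = true := by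
            rcases Bool.or_eq_true_iff.mp hq with h | h
            · rcases Bool.or_eq_true_iff.mp h with h' | h'
              · exact pvColon_of_prefix (by decide) h'
              · exact pvColon_of_prefix (by decide) h'
            · exact pvColon_of_prefix (by decide) h
          have hrole : pvIsRoleB (PySem.Str.strip raw) = true := by
            simp only [pvIsRoleB, Bool.or_assoc]
            rcases Bool.or_eq_true_iff.mp hq with h | h
            · rcases Bool.or_eq_true_iff.mp h with h' | h' <;> rw [h'] <;> simp
            · rw [h]; simp
          have hst : pvStepA (msgs, some r, cs) raw =
              (msgs ++ [pvMsgA r cs], some "provider",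
               [PySem.Str.strip (((PySem.Str.splitMax? (PySem.Str.strip raw) ":" 1).getD []).getD 1 "")]) := by
            simp only [pvStepA, pvFlushA]
            rw [if_neg h0, if_neg hp, if_pos hq, if_pos hcolon, if_neg (by simp [hcs])]
          rw [hst, ih _ _ _ (by simp)]
          rw [List.takeWhile_cons, List.dropWhile_cons]
          rw [if_neg (by simp [hrole]), if_neg (by simp [hrole])]
          rw [pvParseLinesB_cons_role _ _ hrole, if_neg hp]
          simp [pvMsgA]
        · have hrole : pvIsRoleB (PySem.Str.strip raw) = false := by
            simp only [pvIsRoleB, Bool.or_assoc]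
            simp only [Bool.or_eq_true, not_or, Bool.not_eq_true, Bool.or_assoc] at hq
            rw [Bool.not_eq_true] at hp
            rw [hp, hq.1, hq.2.1, hq.2.2]
            rfl
          have hst : pvStepA (msgs, some r, cs) raw = (msgs, some r, cs ++ [PySem.Str.strip raw]) := by
            simp only [pvStepA]
            rw [if_neg h0, if_neg hp, if_neg hq]
          rw [hst, ih _ _ _ (by simp)]
          rw [List.takeWhile_cons, List.dropWhile_cons]
          rw [if_pos (by simp [hrole]), if_pos (by simp [hrole])]
          simp

theorem pvInit (ls : List String) :
    ∀ (msgs : List (List (String × Option String))),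
    (let st := ls.foldl pvStepA (msgs, none, [])
     pvFlushA st.1 st.2.1 st.2.2)
    = msgs ++ pvParseLinesB (pvClean ls) := by
  induction ls with
  | nil => intro msgs; simp [pvClean_nil, pvFlushA, pvParseLinesB_nil]
  | cons raw ls ih =>
    intro msgs
    simp only [List.foldl_cons]
    rw [pvClean_cons]
    by_cases h0 : PySem.Str.len (PySem.Str.strip raw) = 0
    · rw [if_pos h0]
      have hst : pvStepA (msgs, none, []) raw = (msgs, none, []) := by
        simp only [pvStepA]
        rw [if_pos h0]
      rw [hst]
      exact ih msgs
    · rw [if_neg h0]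
      by_cases hp : PySem.Str.startswith (PySem.Str.lower (PySem.Str.strip raw)) "patient:" = true
      · have hcolon := pvColon_of_prefix (by decide) hp
        have hrole : pvIsRoleB (PySem.Str.strip raw) = true := by
          simp only [pvIsRoleB]
          rw [hp]
          rfl
        have hst : pvStepA (msgs, none, []) raw =
            (msgs, some "patient",
             [PySem.Str.strip (((PySem.Str.splitMax? (PySem.Str.strip raw) ":" 1).getD []).getD 1 "")]) := by
          simp only [pvStepA, pvFlushA]
          rw [if_neg h0, if_pos hp, if_pos hcolon]
        rw [hst, pvMain _ _ _ _ (by simp), pvParseLinesB_cons_role _ _ hrole, if_pos hp]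
        simp [pvMsgA]
      · by_cases hq : (PySem.Str.startswith (PySem.Str.lower (PySem.Str.strip raw)) "provider:"
            || PySem.Str.startswith (PySem.Str.lower (PySem.Str.strip raw)) "doctor:"
            || PySem.Str.startswith (PySem.Str.lower (PySem.Str.strip raw)) "clinician:") = true
        · have hcolon : PySem.Str.isIn ":" (PySem.Str.strip raw) = true := by
            rcases Bool.or_eq_true_iff.mp hq with h | h
            · rcases Bool.or_eq_true_iff.mp h with h' | h'
              · exact pvColon_of_prefix (by decide) h'
              · exact pvColon_of_prefix (by decide) h'
            · exact pvColon_of_prefix (by decide) h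
          have hrole : pvIsRoleB (PySem.Str.strip raw) = true := by
            simp only [pvIsRoleB, Bool.or_assoc]
            rcases Bool.or_eq_true_iff.mp hq with h | h
            · rcases Bool.or_eq_true_iff.mp h with h' | h' <;> rw [h'] <;> simp
            · rw [h]; simp
          have hst : pvStepA (msgs, none, []) raw =
              (msgs, some "provider",
               [PySem.Str.strip (((PySem.Str.splitMax? (PySem.Str.strip raw) ":" 1).getD []).getD 1 "")]) := by
            simp only [pvStepA, pvFlushA]
            rw [if_neg h0, if_neg hp, if_pos hq, if_pos hcolon]
          rw [hst, pvMain _ _ _ _ (by simp), pvParseLinesB_cons_role _ _ hrole, if_neg hp]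
          simp [pvMsgA]
        · have hrole : pvIsRoleB (PySem.Str.strip raw) = false := by
            simp only [pvIsRoleB, Bool.or_assoc]
            simp only [Bool.or_eq_true, not_or, Bool.not_eq_true, Bool.or_assoc] at hq
            rw [Bool.not_eq_true] at hp
            rw [hp, hq.1, hq.2.1, hq.2.2]
            rfl
          have hst : pvStepA (msgs, none, []) raw = (msgs, none, []) := by
            simp only [pvStepA]
            rw [if_neg h0, if_neg hp, if_neg hq]
          rw [hst, pvParseLinesB_cons_not _ _ hrole]
          exact ih msgs

-- ===== VERDICT (by name: the statement is the Claim_ definition above) =====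
theorem parse_thread_py_spec : Claim_equal_parse_thread_py := by
  intro t _
  unfold Spec_parse_thread_py parse_thread_py parse_thread_py_alt
  exact pvInit _ []
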